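-- pv_equiv track=rewrite | github.com/Sunny-Soni00/Nyaya_AI_Agent | backend/report_service.py | _format_participants
-- ===== SOURCE A (Python) =====
-- def _format_participants(participants):
--     """Format participants section"""
--     section = "\n═══════════════════════════════════════════════════════════════\n"
--     section += "                    PARTICIPANTS PRESENT\n"
--     section += "═══════════════════════════════════════════════════════════════\n\n"
--
--     # Group by role
--     roles = {}
--     for p in participants:
--         role = p.get('role', 'Observer')
--         name = p.get('name', 'Unknown')
--         if role not in roles:
--             roles[role] = []
--         roles[role].append(name)
--
--     # Format by role
--     for role, names in sorted(roles.items()):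
--         section += f"{role}{'s' if len(names) > 1 else ''}:\n"
--         for name in names:
--             section += f"  • {name}\n"
--         section += "\n"
--
--     return section
-- ===== SOURCE B (Python) =====
-- def _format_participants(participants):
--     """Format participants section"""
--     header = ("\n═══════════════════════════════════════════════════════════════\n"
--               "                    PARTICIPANTS PRESENT\n"
--               "═══════════════════════════════════════════════════════════════\n\n")
--     roles = sorted({p.get('role', 'Observer') for p in participants})
--     pieces = []
--     for role in roles:
--         names = [p.get('name', 'Unknown') for p in participants
--                  if p.get('role', 'Observer') == role]
--         pieces.append(role + ('s' if len(names) > 1 else '') + ':\n')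
--         pieces.extend('  • ' + n + '\n' for n in names)
--         pieces.append('\n')
--     return header + ''.join(pieces)
-- ===== Notes on version B (the rewrite author's own statement) =====
-- stated objective: idiomatic
-- what changed: B drops A's dict-of-lists grouping pass: it sorts the de-duplicated role set once, collects each role's names with a filter pass over the participants, and assembles the text as a joined list of pieces instead of repeated string concatenation.
import Mathlib
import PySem

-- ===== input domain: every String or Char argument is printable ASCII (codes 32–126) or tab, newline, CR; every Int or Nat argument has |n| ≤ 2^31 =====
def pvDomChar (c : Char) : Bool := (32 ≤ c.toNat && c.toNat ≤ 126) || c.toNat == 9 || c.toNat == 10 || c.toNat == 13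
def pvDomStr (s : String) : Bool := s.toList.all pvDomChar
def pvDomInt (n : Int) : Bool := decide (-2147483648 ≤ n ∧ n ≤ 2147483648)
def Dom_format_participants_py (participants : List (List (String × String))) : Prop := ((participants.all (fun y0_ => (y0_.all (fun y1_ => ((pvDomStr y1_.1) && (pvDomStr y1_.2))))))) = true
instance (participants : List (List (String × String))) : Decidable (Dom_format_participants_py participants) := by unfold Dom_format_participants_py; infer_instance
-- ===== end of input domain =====

-- B replaces A's dict-of-lists grouping by a sorted de-duplicated role list with one filter pass
-- per role, assembling the text as a joined list of pieces (objective: idiomatic/alternative).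

-- shared helper: p.get(k, dflt) on a Python dict passed as an association list (first match)
def pvGet (p : List (String × String)) (k dflt : String) : String :=
  (PySem.Dict.mk p).getD k dflt

-- ===== PORT A =====
-- The 'if role not in roles: roles[role] = []' + 'roles[role].append(name)' pair is the
-- grouping idiom roles[role] = roles.get(role, []) + [name], i.e. Dict.modify (exact).
-- sorted(roles.items()) compares tuples, but the dict's keys are distinct, so it equals
-- sorting by the first component (exact here).
def format_participants_py (participants : List (List (String × String))) : String :=
  let section0 : String :=
    "\n═══════════════════════════════════════════════════════════════\n"
    ++ "                    PARTICIPANTS PRESENT\n"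
    ++ "═══════════════════════════════════════════════════════════════\n\n"
  let roles : PySem.Dict String (List String) :=
    participants.foldl
      (fun d p =>
        d.modify (pvGet p "role" "Observer") [] (fun l => l ++ [pvGet p "name" "Unknown"]))
      PySem.Dict.empty
  (PySem.List.sorted roles.items (fun kv => kv.1) false).foldl
    (fun s kv =>
      (kv.2.foldl (fun s n => s ++ "  • " ++ n ++ "\n")
        (s ++ kv.1 ++ (if 1 < kv.2.length then "s" else "") ++ ":\n")) ++ "\n")
    section0

-- ===== PORT B =====
def format_participants_py_alt (participants : List (List (String × String))) : String :=
  let header : String :=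
    "\n═══════════════════════════════════════════════════════════════\n"
    ++ "                    PARTICIPANTS PRESENT\n"
    ++ "═══════════════════════════════════════════════════════════════\n\n"
  let roles : List String :=
    PySem.List.sorted
      (PySem.Set.ofList (participants.map (fun p => pvGet p "role" "Observer")))
      (fun r => r) false
  let pieces : List String :=
    roles.flatMap (fun role =>
      let names :=
        (participants.filter (fun p => pvGet p "role" "Observer" == role)).map
          (fun p => pvGet p "name" "Unknown")
      (role ++ (if 1 < names.length then "s" else "") ++ ":\n")
        :: (names.map (fun n => "  • " ++ n ++ "\n") ++ ["\n"]))
  header ++ String.join pieces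

-- ===== PRECONDITION & SPEC =====
def Spec_format_participants_py (participants : List (List (String × String))) (out : String) : Prop := out = format_participants_py_alt participants
instance (participants : List (List (String × String))) (out : String) : Decidable (Spec_format_participants_py participants out) := by unfold Spec_format_participants_py; infer_instance

-- ===== CLAIM (what is proved, stated in full; the proofs are below) =====
def Claim_equal_format_participants_py : Prop := ∀ (participants : List (List (String × String))), Dom_format_participants_py participants → Spec_format_participants_py participants (format_participants_py participants)

-- ===== LEMMAS AND PROOFS =====

theorem pv_foldl_str (l : List String) (a : String) :
    l.foldl (fun r s => r ++ s) a = a ++ l.foldl (fun r s => r ++ s) "" := by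
  induction l generalizing a with
  | nil => simp
  | cons x t ih =>
      simp only [List.foldl]
      rw [ih (a ++ x), ih ("" ++ x)]
      simp [String.append_assoc]

theorem pv_join_cons (x : String) (l : List String) :
    String.join (x :: l) = x ++ String.join l := by
  simp only [String.join, List.foldl]
  rw [pv_foldl_str l ("" ++ x)]
  simp

theorem pv_join_append (l1 l2 : List String) :
    String.join (l1 ++ l2) = String.join l1 ++ String.join l2 := by
  induction l1 with
  | nil => simp [String.join]
  | cons x t ih => simp [pv_join_cons, ih, String.append_assoc]

theorem pv_inner_foldl (names : List String) (s : String) :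
    names.foldl (fun s n => s ++ "  • " ++ n ++ "\n") s
      = s ++ String.join (names.map (fun n => "  • " ++ n ++ "\n")) := by
  induction names generalizing s with
  | nil => simp [String.join]
  | cons n t ih =>
      simp only [List.foldl, List.map]
      rw [ih, pv_join_cons]
      simp [String.append_assoc]

theorem pv_outer_foldl (l : List (String × List String)) (s : String) :
    l.foldl
      (fun s kv =>
        (kv.2.foldl (fun s n => s ++ "  • " ++ n ++ "\n")
          (s ++ kv.1 ++ (if 1 < kv.2.length then "s" else "") ++ ":\n")) ++ "\n")
      s
      = s ++ String.join (l.flatMap (fun kv =>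
          (kv.1 ++ (if 1 < kv.2.length then "s" else "") ++ ":\n")
            :: (kv.2.map (fun n => "  • " ++ n ++ "\n") ++ ["\n"]))) := by
  induction l generalizing s with
  | nil => simp [String.join]
  | cons kv t ih =>
      simp only [List.foldl, List.flatMap_cons, List.cons_append]
      rw [pv_inner_foldl, ih, pv_join_cons, pv_join_append, pv_join_append]
      simp [String.join, String.append_assoc]

-- the grouping dict, sorted by key, is the sorted distinct keys paired with their filtered values
theorem pv_group_sorted (pairs : List (String × String)) :
    PySem.List.sorted
      (pairs.foldl (fun d q => d.modify q.1 [] (fun l => l ++ [q.2])) PySem.Dict.empty).items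
      (fun kv => kv.1) false
      = (PySem.List.sorted (PySem.Set.ofList (pairs.map (fun q => q.1))) (fun r => r) false).map
          (fun k => (k, (pairs.filter (fun q => q.1 == k)).map (fun q => q.2))) := by
  have hnodup :
      (pairs.foldl (fun d q => d.modify q.1 [] (fun l => l ++ [q.2])) PySem.Dict.empty).keys.Nodup := by
    exact PySem.Dict.nodup_keys_foldl_modify_key pairs Prod.fst [] (fun _ q l => l ++ [q.2])
      PySem.Dict.empty (by simp)
  have hkeys :
      (pairs.foldl (fun d q => d.modify q.1 [] (fun l => l ++ [q.2])) PySem.Dict.empty).keys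
        = PySem.Set.ofList (pairs.map (fun q => q.1)) := by
    have := PySem.Dict.keys_foldl_modify_key (l := pairs) (key := Prod.fst)
      (d0 := ([] : List String)) (f := fun _ q l => l ++ [q.2]) (d := PySem.Dict.empty)
    rw [this]
    simp [PySem.Set.update, PySem.Set.ofList_eq_foldl]
  have hgetD : ∀ k,
      (pairs.foldl (fun d q => d.modify q.1 [] (fun l => l ++ [q.2])) PySem.Dict.empty).getD k []
        = (pairs.filter (fun q => q.1 == k)).map (fun q => q.2) := by
    intro k
    rw [PySem.Dict.getD_foldl_modify_append]
    simp
  have hitems :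
      (pairs.foldl (fun d q => d.modify q.1 [] (fun l => l ++ [q.2])) PySem.Dict.empty).items
        = (PySem.Set.ofList (pairs.map (fun q => q.1))).map
            (fun k => (k, (pairs.filter (fun q => q.1 == k)).map (fun q => q.2))) := by
    rw [PySem.Dict.items_eq_map_keys _ hnodup [], hkeys]
    apply List.map_congr_left
    intro k _
    rw [hgetD]
  rw [hitems]
  apply PySem.List.sorted_eq_of_perm_of_pairwise_lt
  · exact (PySem.List.sorted_perm _ _ _).map _
  · exact (PySem.List.sorted_ofList_pairwise_lt (xs := pairs.map (fun q => q.1))).map _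
      (fun a b h => h)

-- ===== VERDICT (by name: the statement is the Claim_ definition above) =====
theorem format_participants_py_spec : Claim_equal_format_participants_py := by
  intro participants _
  simp only [Spec_format_participants_py, format_participants_py, format_participants_py_alt]
  have h1 :
      participants.foldl
        (fun d p =>
          d.modify (pvGet p "role" "Observer") [] (fun l => l ++ [pvGet p "name" "Unknown"]))
        PySem.Dict.empty
        = (participants.map (fun p => (pvGet p "role" "Observer", pvGet p "name" "Unknown"))).foldl
            (fun d q => d.modify q.1 [] (fun l => l ++ [q.2])) PySem.Dict.empty := by
    rw [List.foldl_map]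
  rw [h1, pv_group_sorted, pv_outer_foldl]
  simp [List.flatMap_map, List.map_map, List.filter_map, Function.comp_def]
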